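-- pv_equiv track=rewrite | github.com/jayyeong/Problem_Solving | memo/12312.py | schedule_seminars
-- ===== SOURCE A (Python) =====
-- def schedule_seminars(T, a):
--     n = len(a)  # 세미나 개수
--
--     # 가능한 모든 세미나 일정 탐색
--     best_day = None  # 세미나 수가 가장 많은 날의 세미나 수
--     best_schedule = None  # 최적의 세미나 일정
--
--     for start_day in range(1, T + 1):
--         schedule = []  # 세미나 일정
--         seminar_count = 0  # 세미나 수가 가장 많은 날의 세미나 수
--
--         for i in range(n):
--             # 세미나 일정 계산
--             seminar_day = (start_day + i - 1) % T + 1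
--             if seminar_day == a[i]:
--                 seminar_count += 1
--             schedule.append(seminar_day)
--
--         if best_day is None or seminar_count < best_day:
--             best_day = seminar_count
--             best_schedule = schedule
--
--     return best_schedule
-- ===== SOURCE B (Python) =====
-- def schedule_seminars(T, a):
--     if T <= 0:
--         return None
--     n = len(a)
--     # residue r = (a[i]-i-1) % T marks the unique start_day r+1 on which seminar i matches
--     cnt = {}
--     for i, d in enumerate(a):
--         if 1 <= d <= T:
--             r = (d - i - 1) % T
--             cnt[r] = cnt.get(r, 0) + 1
--     best = 0
--     for r in range(1, T):
--         if cnt.get(r, 0) < cnt.get(best, 0):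
--             best = r
--     return [(best + i) % T + 1 for i in range(n)]
-- ===== Notes on version B (the rewrite author's own statement) =====
-- stated objective: faster
-- what changed: Instead of rebuilding and scoring a full schedule for every start_day (O(T*n)), B builds one histogram of the unique matching start residue (a[i]-i-1) mod T per seminar, scans the T counts once for the first minimum, and builds a single schedule.
import Mathlib
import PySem

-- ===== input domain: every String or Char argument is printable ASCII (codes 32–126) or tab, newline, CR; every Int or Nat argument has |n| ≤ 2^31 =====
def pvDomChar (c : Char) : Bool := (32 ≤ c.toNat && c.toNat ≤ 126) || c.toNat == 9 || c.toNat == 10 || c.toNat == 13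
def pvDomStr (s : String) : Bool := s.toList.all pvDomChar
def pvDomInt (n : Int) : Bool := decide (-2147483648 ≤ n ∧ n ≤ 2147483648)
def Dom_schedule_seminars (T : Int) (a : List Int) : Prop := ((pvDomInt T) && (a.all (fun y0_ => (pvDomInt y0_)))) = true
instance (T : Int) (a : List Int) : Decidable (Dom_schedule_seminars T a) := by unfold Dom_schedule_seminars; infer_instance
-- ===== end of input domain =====

-- B replaces A's O(T*n) rescoring of every start_day by one O(n+T) histogram of the
-- unique matching start residue (a[i]-i-1) mod T per seminar, a single scan for the
-- first minimal count, and one schedule construction.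

-- ===== PORT A =====
def schedule_seminars (T : Int) (a : List Int) : Option (List Int) :=
  let n : Int := a.length
  let res : Option Int × Option (List Int) :=
    (PySem.List.pyRange 1 (T + 1) 1).foldl
      (fun st start_day =>
        let inner : List Int × Int :=
          (PySem.List.pyRange 0 n 1).foldl
            (fun (p : List Int × Int) i =>
              (p.1 ++ [PySem.Int.mod (start_day + i - 1) T + 1],
               if PySem.Int.mod (start_day + i - 1) T + 1 = PySem.List.pyGetD a i 0
               then p.2 + 1 else p.2))
            ([], 0)
        if st.1 = none ∨ inner.2 < st.1.getD 0 then (some inner.2, some inner.1) else st)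
      (none, none)
  res.2

-- ===== PORT B =====
def schedule_seminars_alt (T : Int) (a : List Int) : Option (List Int) :=
  if T ≤ 0 then none
  else
    let n : Int := a.length
    let cnt : PySem.Dict Int Int :=
      (PySem.List.enumerate a 0).foldl
        (fun d p =>
          if 1 ≤ p.2 ∧ p.2 ≤ T then
            d.modify (PySem.Int.mod (p.2 - p.1 - 1) T) 0 (· + 1)
          else d)
        PySem.Dict.empty
    let best : Int :=
      (PySem.List.pyRange 1 T 1).foldl
        (fun best r => if cnt.getD r 0 < cnt.getD best 0 then r else best) 0
    some ((PySem.List.pyRange 0 n 1).map (fun i => PySem.Int.mod (best + i) T + 1))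

-- ===== PRECONDITION & SPEC =====
def Spec_schedule_seminars (T : Int) (a : List Int) (out : Option (List Int)) : Prop := out = schedule_seminars_alt T a
instance (T : Int) (a : List Int) (out : Option (List Int)) : Decidable (Spec_schedule_seminars T a out) := by unfold Spec_schedule_seminars; infer_instance

-- ===== CLAIM (what is proved, stated in full; the proofs are below) =====
def Claim_equal_schedule_seminars : Prop := ∀ (T : Int) (a : List Int), Dom_schedule_seminars T a → Spec_schedule_seminars T a (schedule_seminars T a)

-- ===== LEMMAS AND PROOFS =====

-- A's per-start match count, as a countP over the index range
def pvCntA (T : Int) (a : List Int) (s : Int) : Int :=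
  ((PySem.List.pyRange 0 (a.length : Int) 1).countP
    (fun i => PySem.Int.mod (s + i - 1) T + 1 = PySem.List.pyGetD a i 0) : Int)

-- A's schedule for a given start_day
def pvSched (T : Int) (a : List Int) (s : Int) : List Int :=
  (PySem.List.pyRange 0 (a.length : Int) 1).map (fun i => PySem.Int.mod (s + i - 1) T + 1)

-- the match condition, rewritten as B's residue condition
lemma pv_match_iff (T r i ai : Int) (hT : 0 < T) (hr0 : 0 ≤ r) (hrT : r < T) :
    ((r + 1) + i - 1) % T + 1 = ai ↔ (1 ≤ ai ∧ ai ≤ T ∧ (ai - i - 1) % T = r) := by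
  have hTne : T ≠ 0 := by omega
  have hx0 : 0 ≤ (r + 1 + i - 1) % T := Int.emod_nonneg _ hTne
  have hx1 : (r + 1 + i - 1) % T < T := Int.emod_lt_of_pos _ hT
  have hri : r + 1 + i - 1 = r + i := by ring
  rw [hri] at hx0 hx1 ⊢
  constructor
  · rintro rfl
    refine ⟨by omega, by omega, ?_⟩
    have h1 : (r + i) % T + 1 - i - 1 = (r + i) % T - i := by ring
    rw [h1, Int.sub_emod, Int.emod_emod_of_dvd _ dvd_rfl, ← Int.sub_emod]
    have h2 : r + i - i = r := by ring
    rw [h2, Int.emod_eq_of_lt hr0 hrT]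
  · rintro ⟨h1, h2, h3⟩
    have hmod : Int.ModEq T (ai - i - 1) r := by
      show (ai - i - 1) % T = r % T
      rw [h3, Int.emod_eq_of_lt hr0 hrT]
    have key : (ai - 1) % T = (r + i) % T := by
      have := hmod.add_right i
      have e : ai - i - 1 + i = ai - 1 := by ring
      rw [e] at this
      exact this
    have e2 : (ai - 1) % T = ai - 1 := Int.emod_eq_of_lt (by omega) (by omega)
    omega

-- A's inner loop computes the schedule and the match count
lemma pv_inner_eq (T : Int) (a : List Int) (s : Int) :
    (PySem.List.pyRange 0 (a.length : Int) 1).foldl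
      (fun (p : List Int × Int) i =>
        (p.1 ++ [PySem.Int.mod (s + i - 1) T + 1],
         if PySem.Int.mod (s + i - 1) T + 1 = PySem.List.pyGetD a i 0
         then p.2 + 1 else p.2))
      ([], 0)
    = (pvSched T a s, pvCntA T a s) := by
  rw [PySem.List.foldl_prod_mk
        (f := fun (sc : List Int) i => sc ++ [PySem.Int.mod (s + i - 1) T + 1])
        (g := fun (c : Int) i => if PySem.Int.mod (s + i - 1) T + 1 = PySem.List.pyGetD a i 0 then c + 1 else c)]
  rw [PySem.List.foldl_append_singleton_eq_map]
  have h2 := PySem.List.foldl_count_if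
      (fun i => decide (PySem.Int.mod (s + i - 1) T + 1 = PySem.List.pyGetD a i 0))
      (PySem.List.pyRange 0 (a.length : Int) 1) 0
  simp only [decide_eq_true_eq] at h2
  rw [h2]
  simp [pvSched, pvCntA]

-- A's outer loop from an already-initialised best is a first-argmin fold
lemma pv_foldl_best (c : Int → Int) (sch : Int → List Int) (l : List Int) :
    ∀ m : Int,
      l.foldl
        (fun (st : Option Int × Option (List Int)) s =>
          if st.1 = none ∨ c s < st.1.getD 0 then (some (c s), some (sch s)) else st)
        (some (c m), some (sch m))
      = (some (c (l.foldl (fun b s => if c s < c b then s else b) m)),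
         some (sch (l.foldl (fun b s => if c s < c b then s else b) m))) := by
  induction l with
  | nil => intro m; rfl
  | cons s l ih =>
      intro m
      simp only [List.foldl_cons]
      by_cases h : c s < c m <;> simp [h, ih]

-- shifting the argmin fold by one (A scans start_days, B scans residues)
lemma pv_shift (c g : Int → Int) (T : Int) (h : ∀ r, 0 ≤ r → r < T → c (r + 1) = g r) :
    ∀ (d : Nat) (k m : Int), T - k ≤ d → 0 ≤ m → m < T → 0 ≤ k →
      (PySem.List.pyRange (k + 1) (T + 1) 1).foldl
        (fun b s => if c s < c b then s else b) (m + 1)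
      = (PySem.List.pyRange k T 1).foldl
          (fun b r => if g r < g b then r else b) m + 1 := by
  intro d
  induction d with
  | zero =>
      intro k m hd hm0 hmT hk0
      rw [PySem.List.pyRange_one_eq_nil (by omega), PySem.List.pyRange_one_eq_nil (by omega)]
      rfl
  | succ d ih =>
      intro k m hd hm0 hmT hk0
      by_cases hkT : T ≤ k
      · rw [PySem.List.pyRange_one_eq_nil (by omega), PySem.List.pyRange_one_eq_nil (by omega)]
        rfl
      · rw [PySem.List.pyRange_one_cons (by omega : k + 1 < T + 1),
            PySem.List.pyRange_one_cons (by omega : k < T)]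
        simp only [List.foldl_cons]
        rw [h k (by omega) (by omega), h m hm0 hmT]
        by_cases hc : g k < g m
        · rw [if_pos hc, if_pos hc]
          exact ih (k + 1) k (by omega) (by omega) (by omega) (by omega)
        · rw [if_neg hc, if_neg hc]
          exact ih (k + 1) m (by omega) hm0 hmT (by omega)

-- B's histogram counts exactly A's matches for each residue
lemma pv_cnt_eq (T : Int) (a : List Int) (hT : 0 < T) (r : Int) (hr0 : 0 ≤ r) (hrT : r < T) :
    ((PySem.List.enumerate a 0).foldl
        (fun d p =>
          if 1 ≤ p.2 ∧ p.2 ≤ T then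
            d.modify (PySem.Int.mod (p.2 - p.1 - 1) T) 0 (· + 1)
          else d)
        PySem.Dict.empty).getD r 0
    = pvCntA T a (r + 1) := by
  have step : (PySem.List.enumerate a 0).foldl
        (fun d p =>
          if 1 ≤ p.2 ∧ p.2 ≤ T then
            d.modify (PySem.Int.mod (p.2 - p.1 - 1) T) 0 (· + 1)
          else d)
        (PySem.Dict.empty : PySem.Dict Int Int)
      = ((PySem.List.enumerate a 0).filter (fun p => decide (1 ≤ p.2 ∧ p.2 ≤ T))).foldl
          (fun d p => d.modify (PySem.Int.mod (p.2 - p.1 - 1) T) 0 (· + 1))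
          (PySem.Dict.empty : PySem.Dict Int Int) := by
    rw [List.foldl_filter]
    simp only [decide_eq_true_eq]
  rw [show ((PySem.List.enumerate a 0).foldl
        (fun d p =>
          if 1 ≤ p.2 ∧ p.2 ≤ T then
            d.modify (PySem.Int.mod (p.2 - p.1 - 1) T) 0 (· + 1)
          else d)
        (PySem.Dict.empty : PySem.Dict Int Int)).getD r 0
      = (((PySem.List.enumerate a 0).filter (fun p => decide (1 ≤ p.2 ∧ p.2 ≤ T))).foldl
          (fun d p => d.modify (PySem.Int.mod (p.2 - p.1 - 1) T) 0 (· + 1))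
          (PySem.Dict.empty : PySem.Dict Int Int)).getD r 0
     from congrArg (fun d => PySem.Dict.getD d r 0) step]
  rw [← List.foldl_map (f := fun p : Int × Int => PySem.Int.mod (p.2 - p.1 - 1) T)
        (g := fun (d : PySem.Dict Int Int) x => d.modify x 0 (· + 1))]
  rw [PySem.Dict.getD_foldl_modify_add_one]
  have hempty : (PySem.Dict.empty : PySem.Dict Int Int).getD r 0 = 0 := by simp [pysem]
  rw [hempty, zero_add, List.count_eq_countP, List.countP_map, List.countP_filter]
  rw [PySem.List.enumerate_eq_map_pyRange a 0, List.countP_map]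
  unfold pvCntA
  congr 1
  apply List.countP_congr
  intro i hi
  simp only [Function.comp, decide_eq_true_eq, Bool.and_eq_true]
  have hmod : PySem.Int.mod (PySem.List.pyGetD a i 0 - i - 1) T = (PySem.List.pyGetD a i 0 - i - 1) % T :=
    PySem.Int.mod_eq_emod_of_pos hT
  have hmod2 : PySem.Int.mod ((r + 1) + i - 1) T = ((r + 1) + i - 1) % T :=
    PySem.Int.mod_eq_emod_of_pos hT
  rw [hmod, hmod2]
  simp only [beq_iff_eq]
  rw [pv_match_iff T r i (PySem.List.pyGetD a i 0) hT hr0 hrT]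
  tauto

-- ===== VERDICT (by name: the statement is the Claim_ definition above) =====
theorem schedule_seminars_spec : Claim_equal_schedule_seminars := by
  intro T a _
  unfold Spec_schedule_seminars
  simp only [schedule_seminars, schedule_seminars_alt]
  by_cases hT : T ≤ 0
  · rw [PySem.List.pyRange_one_eq_nil (by omega : T + 1 ≤ 1), if_pos hT]
    rfl
  · rw [if_neg hT]
    have hT0 : 0 < T := by omega
    have hfun : (fun (st : Option Int × Option (List Int)) start_day =>
          let inner : List Int × Int :=
            (PySem.List.pyRange 0 (a.length : Int) 1).foldl
              (fun (p : List Int × Int) i =>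
                (p.1 ++ [PySem.Int.mod (start_day + i - 1) T + 1],
                 if PySem.Int.mod (start_day + i - 1) T + 1 = PySem.List.pyGetD a i 0
                 then p.2 + 1 else p.2))
              ([], 0)
          if st.1 = none ∨ inner.2 < st.1.getD 0 then (some inner.2, some inner.1) else st)
        = (fun st s =>
            if st.1 = none ∨ pvCntA T a s < st.1.getD 0
            then (some (pvCntA T a s), some (pvSched T a s)) else st) := by
      funext st s
      rw [pv_inner_eq T a s]
    rw [hfun]
    rw [PySem.List.pyRange_one_cons (by omega : (1:Int) < T + 1)]
    simp only [List.foldl_cons]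
    simp only [true_or, if_true]
    rw [pv_foldl_best (pvCntA T a) (pvSched T a) _ 1]
    set cnt : PySem.Dict Int Int :=
      (PySem.List.enumerate a 0).foldl
        (fun d p =>
          if 1 ≤ p.2 ∧ p.2 ≤ T then
            d.modify (PySem.Int.mod (p.2 - p.1 - 1) T) 0 (· + 1)
          else d)
        PySem.Dict.empty with hcnt
    have hshift := pv_shift (pvCntA T a) (fun r => cnt.getD r 0) T
      (fun r h0 hr => by rw [← pv_cnt_eq T a hT0 r h0 hr, hcnt])
      (T - 1).toNat 1 0 (by omega) le_rfl hT0 (by omega)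
    simp only [zero_add] at hshift
    rw [show ((1:Int) + 1) = 2 by norm_num] at hshift ⊢
    rw [hshift]
    have hsched : pvSched T a
        ((PySem.List.pyRange 1 T 1).foldl
          (fun b r => if cnt.getD r 0 < cnt.getD b 0 then r else b) 0 + 1)
        = (PySem.List.pyRange 0 (a.length : Int) 1).map
            (fun i => PySem.Int.mod
              ((PySem.List.pyRange 1 T 1).foldl
                (fun b r => if cnt.getD r 0 < cnt.getD b 0 then r else b) 0 + i) T + 1) := by
      unfold pvSched
      apply List.map_congr_left
      intro i _
      have e : (PySem.List.pyRange 1 T 1).foldl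
          (fun b r => if cnt.getD r 0 < cnt.getD b 0 then r else b) 0 + 1 + i - 1
        = (PySem.List.pyRange 1 T 1).foldl
            (fun b r => if cnt.getD r 0 < cnt.getD b 0 then r else b) 0 + i := by ring
      rw [e]
    rw [hsched]
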